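-- pv_equiv track=rewrite | github.com/AhmedEssa12/automata_practical_exam-4425- | first_task.py | DFA_divided
-- ===== SOURCE A (Python) =====
-- def  DFA_divided(Bin_Str):
--
--    state = 0
--
--    for char in Bin_Str:
--     if char =='1':
--         #Move to the next state (add 1)
--         state = (state + 1) % 3
--     elif char =='0':
--         #No change in status
--         pass
--     else:
--         #If the number is not 0 or 1, it returns an error.
--         return "Invalid input"
--
--    if state == 0:
--       return "Accepted"
--    else:
--       return "Rejected"
-- ===== SOURCE B (Python) =====
-- def DFA_divided(Bin_Str):
--     if any(c not in '01' for c in Bin_Str):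
--         return "Invalid input"
--     return "Accepted" if Bin_Str.count('1') % 3 == 0 else "Rejected"
-- ===== Notes on version B (the rewrite author's own statement) =====
-- stated objective: simpler
-- what changed: Replaces the per-character mod-3 DFA state machine with a whole-string validity check followed by counting all 1s once and taking the modulus once.
import Mathlib
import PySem

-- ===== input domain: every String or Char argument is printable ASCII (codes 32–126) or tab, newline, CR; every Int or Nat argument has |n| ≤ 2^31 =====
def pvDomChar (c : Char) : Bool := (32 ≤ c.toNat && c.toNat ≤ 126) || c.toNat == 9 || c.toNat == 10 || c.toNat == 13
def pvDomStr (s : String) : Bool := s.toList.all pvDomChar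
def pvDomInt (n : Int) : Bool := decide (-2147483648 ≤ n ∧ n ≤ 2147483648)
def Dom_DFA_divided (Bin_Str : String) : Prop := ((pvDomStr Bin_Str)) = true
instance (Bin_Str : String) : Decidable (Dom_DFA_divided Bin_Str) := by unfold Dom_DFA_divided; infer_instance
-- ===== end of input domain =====

-- B replaces A's per-character mod-3 DFA state loop by a whole-string validity check
-- followed by one total count of 1s and a single modulus (simpler decomposition).


-- ===== PORT A =====
-- the 'for char in Bin_Str' loop with early return "Invalid input" and the final
-- state test, as structural recursion over the characters threading 'state'
def DFA_divided_go : List Char → Int → String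
  | [], state => if state = 0 then "Accepted" else "Rejected"
  | c :: rest, state =>
    if c = '1' then DFA_divided_go rest (PySem.Int.mod (state + 1) 3)
    else if c = '0' then DFA_divided_go rest state
    else "Invalid input"

def DFA_divided (Bin_Str : String) : String :=
  DFA_divided_go Bin_Str.toList 0

-- ===== PORT B =====
-- any(c not in '01' for c in Bin_Str) → "Invalid input"; else Bin_Str.count('1') % 3
def DFA_divided_alt (Bin_Str : String) : String :=
  if Bin_Str.toList.any (fun c => !(c = '0' ∨ c = '1')) then "Invalid input"
  else if PySem.Int.mod (PySem.Str.count Bin_Str "1" : Int) 3 = 0 then "Accepted"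
  else "Rejected"

-- ===== PRECONDITION & SPEC =====
def Spec_DFA_divided (Bin_Str : String) (out : String) : Prop := out = DFA_divided_alt Bin_Str
instance (Bin_Str : String) (out : String) : Decidable (Spec_DFA_divided Bin_Str out) := by unfold Spec_DFA_divided; infer_instance

-- ===== CLAIM (what is proved, stated in full; the proofs are below) =====
def Claim_equal_DFA_divided : Prop := ∀ (Bin_Str : String), Dom_DFA_divided Bin_Str → Spec_DFA_divided Bin_Str (DFA_divided Bin_Str)

-- ===== LEMMAS AND PROOFS =====

-- single-character str.count is occurrence count
theorem count_go_one (cs : List Char) (fuel acc : Nat) (h : cs.length ≤ fuel) :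
    PySem.Chars.count.go ['1'] fuel cs acc = acc + cs.count '1' := by
  induction cs generalizing fuel acc with
  | nil => cases fuel <;> simp [PySem.Chars.count.go]
  | cons c t ih =>
    cases fuel with
    | zero => simp at h
    | succ n =>
      simp only [PySem.Chars.count.go, List.isPrefixOf]
      by_cases hc : c = '1'
      · simp [hc, ih _ _ (by simpa using h)]
        omega
      · simp [Ne.symm hc, hc, ih _ _ (by simpa using h)]

theorem chars_count_one (cs : List Char) : PySem.Chars.count cs ['1'] = cs.count '1' := by
  simp [PySem.Chars.count, count_go_one cs cs.length 0 le_rfl]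

-- characterisation of A's loop: invalid input wins, else mod-3 of state + number of 1s
theorem go_eq (cs : List Char) (st : Int) (hst : 0 ≤ st ∧ st < 3) :
    DFA_divided_go cs st =
      if cs.all (fun c => c = '0' ∨ c = '1') then
        (if (st + (cs.count '1' : Int)) % 3 = 0 then "Accepted" else "Rejected")
      else "Invalid input" := by
  induction cs generalizing st with
  | nil =>
    have : st = 0 ↔ 3 ∣ st := by omega
    simp [DFA_divided_go, this]
  | cons c t ih =>
    by_cases hc1 : c = '1'
    · have hb : 0 ≤ (st + 1) % 3 ∧ (st + 1) % 3 < 3 := by omega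
      simp [DFA_divided_go, hc1, ih _ hb]
      ring_nf
    · by_cases hc0 : c = '0'
      · simp [DFA_divided_go, hc0, ih _ hst]
      · simp [DFA_divided_go, hc0, hc1]

-- ===== VERDICT (by name: the statement is the Claim_ definition above) =====
theorem DFA_divided_spec : Claim_equal_DFA_divided := by
  intro s _
  unfold Spec_DFA_divided DFA_divided DFA_divided_alt
  rw [go_eq _ _ (by omega)]
  by_cases hv : s.toList.all (fun c => c = '0' ∨ c = '1')
  · have hv' : ∀ x ∈ s.toList, x = '0' ∨ x = '1' := by simpa using hv
    clear hv
    have hnex : ¬ ∃ x ∈ s.toList, ¬x = '0' ∧ ¬x = '1' := by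
      rintro ⟨x, hx, h0, h1⟩
      rcases hv' x hx with h | h <;> contradiction
    rw [PySem.Int.mod_eq_emod_of_pos (by norm_num)]
    simp [hnex, PySem.Str.count, chars_count_one]
  · have hv' : ¬ ∀ x ∈ s.toList, x = '0' ∨ x = '1' := by simpa using hv
    have hex : ∃ x ∈ s.toList, ¬x = '0' ∧ ¬x = '1' := by
      push Not at hv'
      obtain ⟨x, hx, h⟩ := hv'
      exact ⟨x, hx, by tauto⟩
    simp [hv', hex]
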